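-- pv_equiv track=rewrite | github.com/ruoyuxie/when-to-stop | src/chunking_manager.py | _split_kv_into_chunks
-- ===== SOURCE A (Python) =====
-- from typing import List, Tuple, Dict, Optional
--
-- def _split_kv_into_chunks(text: str) -> List[str]:
--     """Split key-value pairs into chunks."""
--     # Handle both semicolon and newline separators
--     text = text.replace('\n', ';')
--     # Split by semicolon and filter empty chunks
--     pairs = [chunk.strip() for chunk in text.split(';') if chunk.strip()]
--
--     # Create progressive chunks
--     chunks = []
--     current_text = ""
--     for pair in pairs:
--         current_text += pair + "; "
--         chunks.append(current_text)
--
--     return chunks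
-- ===== SOURCE B (Python) =====
-- from typing import List
--
-- def _split_kv_into_chunks(text: str) -> List[str]:
--     """Split key-value pairs into chunks."""
--     # Single character scan: a semicolon or newline ends a token (no replace/split passes)
--     pairs = []
--     tok = ""
--     for ch in text:
--         if ch == ';' or ch == '\n':
--             t = tok.strip()
--             if t:
--                 pairs.append(t)
--             tok = ""
--         else:
--             tok += ch
--     t = tok.strip()
--     if t:
--         pairs.append(t)
--     # Each progressive chunk is the separator-join of its prefix, computed independently
--     return ['; '.join(pairs[:i + 1]) + '; ' for i in range(len(pairs))]
-- ===== Notes on version B (the rewrite author's own statement) =====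
-- stated objective: alternative
-- what changed: The replace/split/strip preprocessing passes are fused into one character scan that emits a stripped token at each semicolon or newline, and the running current_text accumulator is replaced by joining each prefix slice independently.
import Mathlib
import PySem

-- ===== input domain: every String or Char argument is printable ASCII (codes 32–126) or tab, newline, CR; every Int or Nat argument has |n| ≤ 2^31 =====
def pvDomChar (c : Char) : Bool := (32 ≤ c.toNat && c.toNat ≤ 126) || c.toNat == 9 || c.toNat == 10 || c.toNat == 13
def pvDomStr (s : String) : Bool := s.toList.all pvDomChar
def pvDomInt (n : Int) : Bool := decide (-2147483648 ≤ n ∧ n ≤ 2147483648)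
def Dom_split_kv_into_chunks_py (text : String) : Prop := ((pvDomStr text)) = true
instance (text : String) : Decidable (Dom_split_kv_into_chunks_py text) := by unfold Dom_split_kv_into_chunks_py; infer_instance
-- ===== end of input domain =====

-- B fuses the replace/split/strip passes into one character scan emitting tokens, and builds each chunk independently as the join of its prefix (objective: alternative).


-- ===== PORT A =====
-- text.split(';') with the non-empty separator ';' always succeeds, so `.getD []` only discharges the option.
def split_kv_into_chunks_py (text : String) : List String :=
  let text := PySem.Str.replace text "\n" ";"
  let pairs := ((PySem.Str.split? text ";").getD []).filterMap
    (fun chunk => if PySem.Str.strip chunk ≠ "" then some (PySem.Str.strip chunk) else none)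
  (pairs.foldl
    (fun (st : String × List String) pair =>
      let current := st.1 ++ (pair ++ "; ")
      (current, st.2 ++ [current])) ("", [])).2

-- ===== PORT B =====
def split_kv_into_chunks_py_alt (text : String) : List String :=
  let st := text.toList.foldl
    (fun (st : List String × String) ch =>
      if ch = ';' ∨ ch = '\n' then
        let t := PySem.Str.strip st.2
        (if t ≠ "" then st.1 ++ [t] else st.1, "")
      else
        (st.1, st.2.push ch)) ([], "")
  let t := PySem.Str.strip st.2
  let pairs := if t ≠ "" then st.1 ++ [t] else st.1
  (List.range pairs.length).map
    (fun (i : Nat) => PySem.Str.join "; " (PySem.List.slice pairs none (some ((i : Int) + 1))) ++ "; ")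

-- ===== PRECONDITION & SPEC =====
def Spec_split_kv_into_chunks_py (text : String) (out : List String) : Prop := out = split_kv_into_chunks_py_alt text
instance (text : String) (out : List String) : Decidable (Spec_split_kv_into_chunks_py text out) := by unfold Spec_split_kv_into_chunks_py; infer_instance

-- ===== CLAIM (what is proved, stated in full; the proofs are below) =====
def Claim_equal_split_kv_into_chunks_py : Prop := ∀ (text : String), Dom_split_kv_into_chunks_py text → Spec_split_kv_into_chunks_py text (split_kv_into_chunks_py text)

-- ===== LEMMAS AND PROOFS =====

/-- '\n' ↦ ';', the character map performed by A's replace. -/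
def pvSwap (c : Char) : Char := if c = '\n' then ';' else c

/-- Plain recursive split on ';' (Python's str.split(';') shape: always non-empty result). -/
def pvSplit : List Char → List (List Char)
  | [] => [[]]
  | c :: t => if c = ';' then [] :: pvSplit t else (pvSplit t).modifyHead (c :: ·)

/-- The filter-and-strip step applied to each raw chunk. -/
def pvStripO (cs : List Char) : Option (List Char) :=
  if PySem.Chars.strip cs ≠ [] then some (PySem.Chars.strip cs) else none

/-- Concatenation of `p ++ "; "` over a list of pairs: the shape of A's accumulator. -/
def pvCat : List String → String
  | [] => ""
  | p :: ps => (p ++ "; ") ++ pvCat ps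

theorem pvStr_assoc (a b c : String) : (a ++ b) ++ c = a ++ (b ++ c) :=
  String.toList_injective (by simp)

theorem pvStr_empty_append (a : String) : "" ++ a = a :=
  String.toList_injective (by simp)

theorem pvModifyHead_fun_id {α : Type} (l : List α) : l.modifyHead (fun x => x) = l := by
  cases l <;> simp

/-- Single-char replace.go is a map. -/
theorem pvReplaceGo (o n : Char) (l acc : List Char) (fuel : Nat) (h : l.length ≤ fuel) :
    PySem.Chars.replace.go [o] [n] fuel l acc
      = acc.reverse ++ l.map (fun c => if c = o then n else c) := by
  induction l generalizing acc fuel with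
  | nil => cases fuel <;> simp [PySem.Chars.replace.go]
  | cons c t ih =>
    cases fuel with
    | zero => simp at h
    | succ f =>
      simp only [PySem.Chars.replace.go]
      by_cases hc : c = o
      · have : [o].isPrefixOf (c :: t) = true := by simp [List.isPrefixOf, hc]
        rw [this]
        simp only [if_true, List.length_singleton, List.drop_succ_cons, List.drop_zero]
        rw [ih _ _ (by simp at h; omega)]
        simp [hc]
      · have : [o].isPrefixOf (c :: t) = false := by
          simp [List.isPrefixOf]; exact fun h' => absurd h'.symm hc
        rw [this]
        simp only [Bool.false_eq_true, if_false]
        rw [ih _ _ (by simpa using Nat.le_of_succ_le_succ h)]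
        simp [hc]

theorem pvReplace (l : List Char) :
    PySem.Chars.replace l ['\n'] [';'] = l.map pvSwap := by
  simp only [PySem.Chars.replace, List.isEmpty_cons, Bool.false_eq_true, if_false]
  rw [pvReplaceGo _ _ _ _ _ (le_refl _)]
  simp [pvSwap]

/-- Single-char splitOn.go is pvSplit (with the pending partial chunk prepended to the head). -/
theorem pvSplitGo (l cur : List Char) (acc : List (List Char)) (fuel : Nat) (h : l.length ≤ fuel) :
    PySem.Chars.splitOn.go [';'] fuel l cur acc
      = acc.reverse ++ (pvSplit l).modifyHead (cur.reverse ++ ·) := by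
  induction l generalizing cur acc fuel with
  | nil => cases fuel <;> simp [PySem.Chars.splitOn.go, pvSplit]
  | cons c t ih =>
    cases fuel with
    | zero => simp at h
    | succ f =>
      simp only [PySem.Chars.splitOn.go]
      by_cases hc : c = ';'
      · have : [';'].isPrefixOf (c :: t) = true := by simp [List.isPrefixOf, hc]
        rw [this]
        simp only [if_true, List.length_singleton, List.drop_succ_cons, List.drop_zero]
        rw [ih _ _ _ (by simp at h; omega)]
        simp [pvSplit, hc, List.modifyHead_cons, pvModifyHead_fun_id]
      · have : [';'].isPrefixOf (c :: t) = false := by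
          simp [List.isPrefixOf]; exact fun h' => absurd h'.symm hc
        rw [this]
        simp only [Bool.false_eq_true, if_false]
        rw [ih _ _ _ (by simp at h; omega)]
        simp only [pvSplit, hc, if_false, List.modifyHead_modifyHead]
        congr 2
        funext x
        simp [Function.comp]

theorem pvSplitOn (l : List Char) :
    PySem.Chars.splitOn l [';'] = pvSplit l := by
  rw [PySem.Chars.splitOn, pvSplitGo _ _ _ _ (by omega)]
  simp [pvModifyHead_fun_id]

/-- A's pairs pipeline, reduced to char-level pvSplit form. -/
theorem pvPairsA (text : String) :
    ((PySem.Str.split? (PySem.Str.replace text "\n" ";") ";").getD []).filterMap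
      (fun chunk => if PySem.Str.strip chunk ≠ "" then some (PySem.Str.strip chunk) else none)
    = ((text.toList.map pvSwap |> pvSplit).filterMap pvStripO).map String.ofList := by
  rw [PySem.Str.split?, PySem.Chars.split?]
  simp only [PySem.Str.replace, String.toList_ofList]
  have : ("\n" : String).toList = ['\n'] := rfl
  rw [this]
  have : (";" : String).toList = [';'] := rfl
  rw [this]
  simp only [List.isEmpty_cons, Bool.false_eq_true, if_false, Option.map_some, Option.getD_some]
  rw [pvReplace, pvSplitOn, List.filterMap_map]
  rw [show ((fun chunk => if PySem.Str.strip chunk ≠ "" then some (PySem.Str.strip chunk) else none) ∘ String.ofList)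
      = fun cs => (pvStripO cs).map String.ofList from ?_]
  · rw [← List.map_filterMap]
  · funext cs
    simp only [Function.comp, pvStripO]
    by_cases h : PySem.Chars.strip cs = []
    · have : PySem.Str.strip (String.ofList cs) = "" := by
        apply String.toList_injective; simp [PySem.Str.strip, h]
      simp [this, h]
    · have : PySem.Str.strip (String.ofList cs) ≠ "" := by
        intro he
        exact h (by simpa [PySem.Str.strip] using congrArg String.toList he)
      simp [h, PySem.Str.strip]

/-- B's scanning loop (plus final flush), reduced to the same char-level form. -/
theorem pvScanB (l : List Char) (acc : List String) (tok : String) :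
    (let st := l.foldl
        (fun (st : List String × String) ch =>
          if ch = ';' ∨ ch = '\n' then
            let t := PySem.Str.strip st.2
            (if t ≠ "" then st.1 ++ [t] else st.1, "")
          else
            (st.1, st.2.push ch)) (acc, tok)
      let t := PySem.Str.strip st.2
      if t ≠ "" then st.1 ++ [t] else st.1)
    = acc ++ (((pvSplit (l.map pvSwap)).modifyHead (tok.toList ++ ·)).filterMap pvStripO).map String.ofList := by
  induction l generalizing acc tok with
  | nil =>
    simp only [List.map_nil, pvSplit, List.modifyHead, List.append_nil, List.foldl_nil,
      List.filterMap, pvStripO]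
    by_cases h : PySem.Chars.strip tok.toList = []
    · have : PySem.Str.strip tok = "" := by
        apply String.toList_injective; simp [PySem.Str.strip, h]
      simp [this, h]
    · have : PySem.Str.strip tok ≠ "" := by
        intro he
        exact h (by simpa [PySem.Str.strip] using congrArg String.toList he)
      simp [h, PySem.Str.strip]
  | cons c t ih =>
    simp only [List.foldl_cons]
    by_cases hc : c = ';' ∨ c = '\n'
    · have hsw : pvSwap c = ';' := by
        rcases hc with h | h <;> simp [pvSwap, h]
      simp only [if_pos hc]
      rw [ih]
      have hid : List.modifyHead (fun x => ("" : String).toList ++ x) (pvSplit (t.map pvSwap))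
          = pvSplit (t.map pvSwap) := by
        cases h' : pvSplit (t.map pvSwap) <;> simp
      rw [hid]
      simp only [List.map_cons, hsw, pvSplit, pvStripO]
      by_cases h : PySem.Chars.strip tok.toList = []
      · have : PySem.Str.strip tok = "" := by
          apply String.toList_injective; simp [PySem.Str.strip, h]
        simp [this, h]
      · have hne : PySem.Str.strip tok ≠ "" := by
          intro he
          exact h (by simpa [PySem.Str.strip] using congrArg String.toList he)
        simp [h, PySem.Str.strip, List.append_assoc]
    · have hsw : pvSwap c = c := by
        simp only [pvSwap]
        rw [if_neg]
        intro h; exact hc (Or.inr h)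
      have hcs : ¬ c = ';' := fun h => hc (Or.inl h)
      simp only [if_neg hc]
      rw [ih]
      simp only [List.map_cons, hsw, pvSplit, if_neg hcs, List.modifyHead_modifyHead]
      have hfun : (fun x => (tok.push c).toList ++ x)
          = ((fun x => tok.toList ++ x) ∘ fun x => c :: x) := by
        funext x
        simp [Function.comp, String.toList_push]
      rw [hfun]

theorem pvLoopA (pairs : List String) (cur : String) (acc : List String) :
    (pairs.foldl
      (fun (st : String × List String) pair =>
        let current := st.1 ++ (pair ++ "; ")
        (current, st.2 ++ [current])) (cur, acc)).2
    = acc ++ (List.range pairs.length).map (fun i => cur ++ pvCat (pairs.take (i + 1))) := by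
  induction pairs generalizing cur acc with
  | nil => simp
  | cons p ps ih =>
    simp only [List.foldl_cons]
    rw [ih, List.length_cons, List.range_succ_eq_map]
    simp [List.map_map, Function.comp, pvCat, pvStr_assoc, List.append_assoc]

theorem pvJoin (p : String) (xs : List String) :
    PySem.Str.join "; " (p :: xs) ++ "; " = pvCat (p :: xs) := by
  induction xs generalizing p with
  | nil =>
    apply String.toList_injective
    simp [PySem.Str.join, pvCat, PySem.Chars.join_singleton]
  | cons q qs ih =>
    apply String.toList_injective
    have hih := congrArg String.toList (ih q)
    simp [PySem.Str.join] at hih ⊢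
    rw [PySem.Chars.join_cons_cons]
    simp only [List.append_assoc, List.cons_append, List.nil_append] at hih ⊢
    rw [hih]
    simp [pvCat]

/-- The progressive-chunk stage: A's accumulator fold equals B's prefix-join map. -/
theorem pvChunks (pairs : List String) :
    (pairs.foldl
      (fun (st : String × List String) pair =>
        let current := st.1 ++ (pair ++ "; ")
        (current, st.2 ++ [current])) ("", [])).2
    = (List.range pairs.length).map
        (fun (i : Nat) => PySem.Str.join "; " (PySem.List.slice pairs none (some ((i : Int) + 1))) ++ "; ") := by
  rw [pvLoopA]
  cases pairs with
  | nil => simp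
  | cons q qs =>
    simp only [List.nil_append]
    apply List.map_congr_left
    intro i _
    have hcast : ((i : Int) + 1) = ((i + 1 : Nat) : Int) := by push_cast; ring
    rw [hcast, PySem.List.slice_to_natCast, List.take_succ_cons, pvJoin, pvStr_empty_append]

-- ===== VERDICT (by name: the statement is the Claim_ definition above) =====
theorem split_kv_into_chunks_py_spec : Claim_equal_split_kv_into_chunks_py := by
  intro text _
  show split_kv_into_chunks_py text = split_kv_into_chunks_py_alt text
  simp only [split_kv_into_chunks_py, split_kv_into_chunks_py_alt]
  rw [pvPairsA, pvChunks]
  have hB := pvScanB text.toList [] ""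
  simp only at hB
  rw [hB]
  have hid : List.modifyHead (fun x => ("" : String).toList ++ x) (pvSplit (text.toList.map pvSwap))
      = pvSplit (text.toList.map pvSwap) := by
    cases h' : pvSplit (text.toList.map pvSwap) <;> simp
  rw [hid]
  simp only [List.nil_append]
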